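-- pv_equiv track=rewrite | github.com/Roh-coder/newQFE | thinkDoubleTwist/compare_correlator_triangular_vs_vuw.py | period_for_direction
-- ===== SOURCE A (Python) =====
-- def period_for_direction(dm, dn, lx, ly, tx, ty):
--     # Find period for direction in twisted cell
--     ncell = lx * ly + tx * ty
--     def coset_key(m, n):
--         def mod(a, n):
--             r = a % n
--             return r + n if r < 0 else r
--         k1 = mod(-ly * m - tx * n, ncell)
--         k2 = mod(-ty * m + lx * n, ncell)
--         return (k1, k2)
--     k0 = coset_key(0, 0)
--     r = 1
--     while True:
--         k = coset_key(dm * r, dn * r)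
--         if k == k0:
--             return r
--         if r > ncell:
--             raise RuntimeError("Could not find period within ncell steps")
--         r += 1
-- ===== SOURCE B (Python) =====
-- def period_for_direction(dm, dn, lx, ly, tx, ty):
--     # Closed form: smallest r >= 1 with ncell | (ly*dm+tx*dn)*r and
--     # ncell | (ty*dm-lx*dn)*r is lcm(ncell/gcd(a,ncell), ncell/gcd(b,ncell)).
--     def gcd(a, b):
--         while b:
--             a, b = b, a % b
--         return a
--     ncell = abs(lx * ly + tx * ty)
--     a = abs(ly * dm + tx * dn)
--     b = abs(ty * dm - lx * dn)
--     pa = ncell // gcd(a, ncell)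
--     pb = ncell // gcd(b, ncell)
--     return pa // gcd(pa, pb) * pb
-- ===== Notes on version B (the rewrite author's own statement) =====
-- stated objective: faster
-- what changed: Replaces A's linear trial loop over r = 1, 2, ... (each step recomputing the coset key) with the closed form lcm(ncell/gcd(a,ncell), ncell/gcd(b,ncell)) for a = ly*dm+tx*dn, b = ty*dm-lx*dn, computed with the Euclidean algorithm.
import Mathlib
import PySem

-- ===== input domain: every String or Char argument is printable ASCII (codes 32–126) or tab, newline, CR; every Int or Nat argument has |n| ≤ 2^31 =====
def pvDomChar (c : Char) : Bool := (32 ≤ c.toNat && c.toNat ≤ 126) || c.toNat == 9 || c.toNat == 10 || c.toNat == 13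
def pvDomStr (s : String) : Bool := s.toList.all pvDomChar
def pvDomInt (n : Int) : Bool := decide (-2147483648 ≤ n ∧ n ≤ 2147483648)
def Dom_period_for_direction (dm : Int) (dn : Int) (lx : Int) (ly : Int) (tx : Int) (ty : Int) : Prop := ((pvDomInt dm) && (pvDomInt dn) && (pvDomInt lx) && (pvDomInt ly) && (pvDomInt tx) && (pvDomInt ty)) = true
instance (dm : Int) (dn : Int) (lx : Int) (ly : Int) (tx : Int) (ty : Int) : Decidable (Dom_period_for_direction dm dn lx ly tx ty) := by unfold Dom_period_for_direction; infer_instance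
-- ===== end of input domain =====

-- B replaces A's linear trial loop over r = 1, 2, … by the closed form
-- lcm(ncell/gcd(a,ncell), ncell/gcd(b,ncell)) computed with the Euclidean algorithm (objective: faster).

-- ===== PORT A =====
-- inner helper 'mod' of coset_key: Python 'a % n' plus the (dead for n>0) negative-adjust branch
def pvModA (a : Int) (n : Int) : Int :=
  let r := PySem.Int.mod a n
  if r < 0 then r + n else r

-- helper 'coset_key' (closure over lx ly tx ty and ncell)
def pvCosetKey (lx ly tx ty ncell m n : Int) : Int × Int :=
  (pvModA (-ly * m - tx * n) ncell, pvModA (-ty * m + lx * n) ncell)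

-- A's 'while True' loop. It performs at most ncell+1 iterations before it either returns r or
-- raises RuntimeError; fuel = ncell.toNat + 2 therefore always suffices. Fuel exhaustion and the
-- 'raise' branch are represented by the value 0 — both are unreachable on Pre_ (A raises there).
def pvLoopA (dm dn lx ly tx ty ncell : Int) (k0 : Int × Int) : Nat → Int → Int
  | 0, _ => 0
  | fuel + 1, r =>
    let k := pvCosetKey lx ly tx ty ncell (dm * r) (dn * r)
    if k = k0 then r
    else if r > ncell then 0
    else pvLoopA dm dn lx ly tx ty ncell k0 fuel (r + 1)

def period_for_direction (dm : Int) (dn : Int) (lx : Int) (ly : Int) (tx : Int) (ty : Int) : Int :=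
  let ncell := lx * ly + tx * ty
  let k0 := pvCosetKey lx ly tx ty ncell 0 0
  pvLoopA dm dn lx ly tx ty ncell k0 (ncell.toNat + 2) 1

-- ===== PORT B =====
-- Source B's hand-written Euclidean gcd ('while b: a, b = b, a % b'); all call sites pass
-- non-negative values, so Nat with Nat '%' is exact.
def pyGcdB (a b : Nat) : Nat :=
  if h : b = 0 then a else pyGcdB b (a % b)
termination_by b
decreasing_by exact Nat.mod_lt a (Nat.pos_of_ne_zero h)

-- all quantities are made non-negative by 'abs', so Nat '/' is Python's '//' exactly
def period_for_direction_alt (dm : Int) (dn : Int) (lx : Int) (ly : Int) (tx : Int) (ty : Int) : Int :=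
  let ncell := (lx * ly + tx * ty).natAbs
  let a := (ly * dm + tx * dn).natAbs
  let b := (ty * dm - lx * dn).natAbs
  let pa := ncell / pyGcdB a ncell
  let pb := ncell / pyGcdB b ncell
  ((pa / pyGcdB pa pb * pb : Nat) : Int)

-- ===== PRECONDITION & SPEC =====
-- Pre_ excludes exactly the inputs where A raises: ncell = 0 (ZeroDivisionError in mod), and
-- ncell < 0 unless both direction components are divisible at r = 1 (then 'r > ncell' raises
-- RuntimeError immediately). A returns on every input satisfying Pre_.
def Pre_period_for_direction (dm : Int) (dn : Int) (lx : Int) (ly : Int) (tx : Int) (ty : Int) : Prop :=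
  lx * ly + tx * ty ≠ 0 ∧
  (0 < lx * ly + tx * ty ∨
    ((lx * ly + tx * ty) ∣ (ly * dm + tx * dn) ∧ (lx * ly + tx * ty) ∣ (ty * dm - lx * dn)))
instance (dm : Int) (dn : Int) (lx : Int) (ly : Int) (tx : Int) (ty : Int) : Decidable (Pre_period_for_direction dm dn lx ly tx ty) := by unfold Pre_period_for_direction; infer_instance

def pvWitness_period_for_direction : Int × Int × Int × Int × Int × Int := (1, 1, 2, 1, 1, 1)

def Spec_period_for_direction (dm : Int) (dn : Int) (lx : Int) (ly : Int) (tx : Int) (ty : Int) (out : Int) : Prop := out = period_for_direction_alt dm dn lx ly tx ty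
instance (dm : Int) (dn : Int) (lx : Int) (ly : Int) (tx : Int) (ty : Int) (out : Int) : Decidable (Spec_period_for_direction dm dn lx ly tx ty out) := by unfold Spec_period_for_direction; infer_instance

-- ===== CLAIM (what is proved, stated in full; the proofs are below) =====
def Claim_equal_period_for_direction : Prop := ∀ (dm : Int) (dn : Int) (lx : Int) (ly : Int) (tx : Int) (ty : Int), Dom_period_for_direction dm dn lx ly tx ty → Pre_period_for_direction dm dn lx ly tx ty → Spec_period_for_direction dm dn lx ly tx ty (period_for_direction dm dn lx ly tx ty)

-- ===== LEMMAS AND PROOFS =====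

theorem pyGcdB_eq (a b : Nat) : pyGcdB a b = Nat.gcd a b := by
  induction b using Nat.strong_induction_on generalizing a with
  | _ b ih =>
    rw [pyGcdB]
    by_cases h : b = 0
    · simp [h]
    · rw [dif_neg h, ih _ (Nat.mod_lt a (Nat.pos_of_ne_zero h)),
        Nat.gcd_comm b (a % b), ← Nat.gcd_rec, Nat.gcd_comm b a]

-- n ∣ a * m ↔ (n / gcd a n) ∣ m, for n > 0
theorem key_dvd (a n m : Nat) (h : 0 < n) : n ∣ a * m ↔ n / Nat.gcd a n ∣ m := by
  have hg : 0 < Nat.gcd a n := Nat.gcd_pos_of_pos_right a h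
  have hco : Nat.Coprime (a / Nat.gcd a n) (n / Nat.gcd a n) := Nat.coprime_div_gcd_div_gcd hg
  have hea : Nat.gcd a n * (a / Nat.gcd a n) = a := Nat.mul_div_cancel' (Nat.gcd_dvd_left a n)
  have hen : Nat.gcd a n * (n / Nat.gcd a n) = n := Nat.mul_div_cancel' (Nat.gcd_dvd_right a n)
  constructor
  · intro hd
    have h1 : Nat.gcd a n * (n / Nat.gcd a n) ∣ Nat.gcd a n * ((a / Nat.gcd a n) * m) := by
      rw [hen, ← Nat.mul_assoc, hea]; exact hd
    exact Nat.Coprime.dvd_of_dvd_mul_left (Nat.Coprime.symm hco)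
      ((Nat.mul_dvd_mul_iff_left hg).mp h1)
  · intro hd
    calc n = Nat.gcd a n * (n / Nat.gcd a n) := hen.symm
    _ ∣ Nat.gcd a n * m := Nat.mul_dvd_mul_left _ hd
    _ ∣ a * m := Nat.mul_dvd_mul_right (Nat.gcd_dvd_left a n) m

theorem pvModA_eq_zero_iff (a n : Int) (h : n ≠ 0) : pvModA a n = 0 ↔ n ∣ a := by
  simp only [pvModA]
  rcases lt_or_gt_of_ne h with hn | hn
  · obtain ⟨h1, h2⟩ := PySem.Int.mod_neg_bounds a hn
    split_ifs with hr
    · constructor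
      · intro he; omega
      · intro hd
        have := (PySem.Int.mod_eq_zero_iff_dvd a n).mpr hd
        omega
    · exact PySem.Int.mod_eq_zero_iff_dvd a n
  · have h1 := PySem.Int.mod_nonneg a hn
    split_ifs with hr
    · omega
    · exact PySem.Int.mod_eq_zero_iff_dvd a n

theorem pvCosetKey_zero (lx ly tx ty ncell : Int) (h : ncell ≠ 0) :
    pvCosetKey lx ly tx ty ncell 0 0 = (0, 0) := by
  unfold pvCosetKey
  have h1 : pvModA 0 ncell = 0 := (pvModA_eq_zero_iff 0 ncell h).mpr (dvd_zero ncell)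
  simp [h1]

theorem pvLoopA_eq (dm dn lx ly tx ty ncell : Int) (k0 : Int × Int) (r0 : Int)
    (hk : pvCosetKey lx ly tx ty ncell (dm * r0) (dn * r0) = k0) :
    ∀ (fuel : Nat) (r : Int), r ≤ r0 →
      (∀ s, r ≤ s → s < r0 → pvCosetKey lx ly tx ty ncell (dm * s) (dn * s) ≠ k0 ∧ s ≤ ncell) →
      (r0 - r).toNat < fuel →
      pvLoopA dm dn lx ly tx ty ncell k0 fuel r = r0 := by
  intro fuel
  induction fuel with
  | zero => intro r _ _ hf; omega
  | succ fuel ih =>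
    intro r hr hs hf
    rw [pvLoopA]
    by_cases hc : pvCosetKey lx ly tx ty ncell (dm * r) (dn * r) = k0
    · simp only [hc, if_true]
      by_contra hne
      have hlt : r < r0 := lt_of_le_of_ne hr (fun he => hne (by rw [he]))
      exact (hs r le_rfl hlt).1 hc
    · have hlt : r < r0 := lt_of_le_of_ne hr (fun he => hc (he ▸ hk))
      have hle : r ≤ ncell := (hs r le_rfl hlt).2
      simp only [hc, if_false]
      have : ¬ r > ncell := not_lt.mpr hle
      simp only [this, if_false]
      exact ih (r + 1) (by omega) (fun s h1 h2 => hs s (by omega) h2) (by omega)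

-- the loop condition at step s (s ≥ 0) is exactly 'L ∣ s' for L = lcm(pa, pb)
theorem cond_iff (dm dn lx ly tx ty : Int) (h : lx * ly + tx * ty ≠ 0) (s : Int) (hs : 0 ≤ s) :
    pvCosetKey lx ly tx ty (lx * ly + tx * ty) (dm * s) (dn * s) =
      pvCosetKey lx ly tx ty (lx * ly + tx * ty) 0 0 ↔
    (((Nat.lcm
        ((lx * ly + tx * ty).natAbs / Nat.gcd (ly * dm + tx * dn).natAbs (lx * ly + tx * ty).natAbs)
        ((lx * ly + tx * ty).natAbs / Nat.gcd (ty * dm - lx * dn).natAbs (lx * ly + tx * ty).natAbs) : Nat)) : Int) ∣ s := by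
  set N := lx * ly + tx * ty with hN
  have hn : 0 < N.natAbs := Int.natAbs_pos.mpr h
  rw [pvCosetKey_zero lx ly tx ty N h]
  unfold pvCosetKey
  rw [Prod.mk.injEq, pvModA_eq_zero_iff _ _ h, pvModA_eq_zero_iff _ _ h]
  have e1 : -ly * (dm * s) - tx * (dn * s) = -((ly * dm + tx * dn) * s) := by ring
  have e2 : -ty * (dm * s) + lx * (dn * s) = -((ty * dm - lx * dn) * s) := by ring
  rw [e1, e2, dvd_neg, dvd_neg]
  have conv : ∀ x : Int, (N ∣ x * s) ↔ N.natAbs ∣ x.natAbs * s.natAbs := by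
    intro x
    rw [← Int.natAbs_dvd_natAbs, Int.natAbs_mul]
  rw [conv, conv, key_dvd _ _ _ hn, key_dvd _ _ _ hn, ← Nat.lcm_dvd_iff,
    ← Int.natCast_dvd_natCast, Int.natCast_natAbs, abs_of_nonneg hs]

-- ===== VERDICT (by name: the statement is the Claim_ definition above) =====
theorem period_for_direction_spec : Claim_equal_period_for_direction := by
  intro dm dn lx ly tx ty _ hpre
  obtain ⟨hne, hcase⟩ := hpre
  unfold Spec_period_for_direction period_for_direction period_for_direction_alt
  simp only [pyGcdB_eq]
  set N := lx * ly + tx * ty with hN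
  set a := ly * dm + tx * dn with ha
  set b := ty * dm - lx * dn with hb
  set n := N.natAbs with hnabs
  set pa := n / Nat.gcd a.natAbs n with hpa
  set pb := n / Nat.gcd b.natAbs n with hpb
  set L := Nat.lcm pa pb with hL
  have hn : 0 < n := Int.natAbs_pos.mpr hne
  have hga : 0 < Nat.gcd a.natAbs n := Nat.gcd_pos_of_pos_right _ hn
  have hgb : 0 < Nat.gcd b.natAbs n := Nat.gcd_pos_of_pos_right _ hn
  have hpa_dvd : pa ∣ n := Nat.div_dvd_of_dvd (Nat.gcd_dvd_right _ _)
  have hpb_dvd : pb ∣ n := Nat.div_dvd_of_dvd (Nat.gcd_dvd_right _ _)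
  have hpa_pos : 0 < pa := Nat.div_pos (Nat.le_of_dvd hn (Nat.gcd_dvd_right _ _)) hga
  have hpb_pos : 0 < pb := Nat.div_pos (Nat.le_of_dvd hn (Nat.gcd_dvd_right _ _)) hgb
  have hL_pos : 0 < L := Nat.lcm_pos hpa_pos hpb_pos
  have hL_dvd : L ∣ n := Nat.lcm_dvd hpa_dvd hpb_dvd
  have hL_le : L ≤ n := Nat.le_of_dvd hn hL_dvd
  -- B's value is the lcm
  have hBval : ((pa / Nat.gcd pa pb * pb : Nat) : Int) = (L : Int) := by
    rw [hL, Nat.lcm, Nat.div_mul_right_comm (Nat.gcd_dvd_left pa pb) pb]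
  rw [hBval]
  -- in the degenerate N < 0 case Pre_ forces L = 1
  have hLneg : N < 0 → L = 1 := by
    intro hNneg
    rcases hcase with h | ⟨hda, hdb⟩
    · omega
    · have h1 : n ∣ a.natAbs := Int.natAbs_dvd_natAbs.mpr hda
      have h2 : n ∣ b.natAbs := Int.natAbs_dvd_natAbs.mpr hdb
      rw [hL, hpa, hpb, Nat.gcd_eq_right h1, Nat.gcd_eq_right h2, Nat.div_self hn]
      simp
  -- A's loop returns L
  apply pvLoopA_eq
  · exact (cond_iff dm dn lx ly tx ty hne (L : Int) (by exact_mod_cast Nat.zero_le L)).mpr dvd_rfl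
  · exact_mod_cast hL_pos
  · intro s hs1 hs2
    constructor
    · intro hkey
      have hdvd : ((L : Nat) : Int) ∣ s :=
        (cond_iff dm dn lx ly tx ty hne s (by omega)).mp hkey
      have := Int.le_of_dvd (by omega) hdvd
      omega
    · rcases lt_or_gt_of_ne hne with hNneg | hNpos
      · have := hLneg hNneg; omega
      · have hnN : (n : Int) = N := Int.natAbs_of_nonneg (le_of_lt hNpos)
        have : (L : Int) ≤ (n : Int) := by exact_mod_cast hL_le
        omega
  · rcases lt_or_gt_of_ne hne with hNneg | hNpos
    · have := hLneg hNneg; omega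
    · have : N.toNat = n := by omega
      omega
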